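-- pv_equiv track=rewrite | github.com/chintan8195/Leetcode-practice | company specific/microsoft/OA/task2.py | solution
-- ===== SOURCE A (Python) =====
-- def solution(A):
--     N = len(A)
--
--     # Edge case: if all elements are the same, return 0
--     if all(x == A[0] for x in A):
--         return 0
--
--     # Case 1: fix i = 0, find furthest j from end such that A[0] != A[j]
--     i = 0
--     j = N - 1
--     while i < j and A[i] == A[j]:
--         j -= 1
--     max_dist = j - i
--
--     # Case 2: fix j = N-1, find furthest i from start such that A[i] != A[N-1]
--     j = N - 1
--     i = 0
--     while i < j and A[i] == A[j]:
--         i += 1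
--     max_dist = max(max_dist, j - i)
--
--     return max_dist
-- ===== SOURCE B (Python) =====
-- def solution(A):
--     N = len(A)
--     ans = 0
--     for k in range(N):
--         if A[k] != A[0]:
--             ans = max(ans, k)
--         if A[k] != A[N - 1]:
--             ans = max(ans, N - 1 - k)
--     return ans
-- ===== Notes on version B (the rewrite author's own statement) =====
-- stated objective: simpler
-- what changed: Replaces the all-equal precheck plus two inward early-exit while loops with a single forward scan that maxes the index/distance whenever an element differs from either endpoint.
import Mathlib
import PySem

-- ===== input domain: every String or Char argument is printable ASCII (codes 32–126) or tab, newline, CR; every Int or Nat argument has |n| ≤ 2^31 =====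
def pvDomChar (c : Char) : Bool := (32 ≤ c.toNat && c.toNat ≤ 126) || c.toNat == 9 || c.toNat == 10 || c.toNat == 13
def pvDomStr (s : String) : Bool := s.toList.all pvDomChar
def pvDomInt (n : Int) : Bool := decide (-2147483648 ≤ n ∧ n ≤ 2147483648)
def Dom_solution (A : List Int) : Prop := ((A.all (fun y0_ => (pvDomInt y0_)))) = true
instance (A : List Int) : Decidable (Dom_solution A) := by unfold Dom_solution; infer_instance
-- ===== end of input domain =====

-- B replaces A's all-equal precheck and two inward early-exit while loops by one forward scan; same O(n) cost, simpler.

-- ===== PORT A =====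
-- while i < j and A[i] == A[j]: j -= 1   (with i = 0; recursion on j, indices stay in range so getD is exact)
def loopJ (A : List Int) : Nat → Nat
  | 0 => 0
  | j + 1 => if A.getD 0 0 = A.getD (j + 1) 0 then loopJ A j else j + 1

-- while i < j and A[i] == A[j]: i += 1   (with j = N-1 fixed)
def loopI (A : List Int) (j : Nat) (i : Nat) : Nat :=
  if i < j ∧ A.getD i 0 = A.getD j 0 then loopI A j (i + 1) else i
termination_by j - i
decreasing_by omega

def solution (A : List Int) : Int :=
  let N := A.length
  if A.all (fun x => x == A.getD 0 0) then 0
  else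
    let j1 := loopJ A (N - 1)
    let maxDist : Int := (j1 : Int) - 0
    let i2 := loopI A (N - 1) 0
    max maxDist ((N : Int) - 1 - (i2 : Int))

-- ===== PORT B =====
def solution_alt (A : List Int) : Int :=
  let N := A.length
  (List.range N).foldl (fun ans k =>
    let a1 := if A.getD k 0 ≠ A.getD 0 0 then max ans (k : Int) else ans
    if A.getD k 0 ≠ A.getD (N - 1) 0 then max a1 ((N : Int) - 1 - (k : Int)) else a1) 0

-- ===== PRECONDITION & SPEC =====
def Spec_solution (A : List Int) (out : Int) : Prop := out = solution_alt A
instance (A : List Int) (out : Int) : Decidable (Spec_solution A out) := by unfold Spec_solution; infer_instance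

-- ===== CLAIM (what is proved, stated in full; the proofs are below) =====
def Claim_equal_solution : Prop := ∀ (A : List Int), Dom_solution A → Spec_solution A (solution A)

-- ===== LEMMAS AND PROOFS =====

-- the per-element contribution of B's loop body
def contrib (A : List Int) (k : Nat) : Int :=
  max (if A.getD k 0 ≠ A.getD 0 0 then (k : Int) else 0)
      (if A.getD k 0 ≠ A.getD (A.length - 1) 0 then (A.length : Int) - 1 - (k : Int) else 0)

-- B's loop body, named
def bbody (A : List Int) (ans : Int) (k : Nat) : Int :=
  let a1 := if A.getD k 0 ≠ A.getD 0 0 then max ans (k : Int) else ans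
  if A.getD k 0 ≠ A.getD (A.length - 1) 0 then max a1 ((A.length : Int) - 1 - (k : Int)) else a1

lemma solution_alt_eq (A : List Int) :
    solution_alt A = (List.range A.length).foldl (bbody A) 0 := rfl

lemma bbody_ge (A : List Int) (ans : Int) (k : Nat) : ans ≤ bbody A ans k := by
  unfold bbody
  dsimp only
  split_ifs <;> simp

lemma bbody_ge_contrib (A : List Int) (ans : Int) (k : Nat) (h0 : 0 ≤ ans) :
    contrib A k ≤ bbody A ans k := by
  unfold bbody contrib
  dsimp only
  split_ifs <;> simp only [max_le_iff, le_max_iff, le_refl, and_true, true_and] <;> omega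

lemma bbody_le (A : List Int) (ans : Int) (k : Nat) (M : Int)
    (h1 : ans ≤ M) (h2 : contrib A k ≤ M) : bbody A ans k ≤ M := by
  unfold bbody; unfold contrib at h2
  dsimp only
  split_ifs at * <;> simp at * <;> omega

lemma foldl_ge_acc (A : List Int) (l : List Nat) (acc : Int) :
    acc ≤ l.foldl (bbody A) acc := by
  induction l generalizing acc with
  | nil => simp
  | cons k t ih => exact le_trans (bbody_ge A acc k) (ih _)

lemma foldl_ge_contrib (A : List Int) (l : List Nat) (acc : Int) (k : Nat)
    (hk : k ∈ l) (h0 : 0 ≤ acc) : contrib A k ≤ l.foldl (bbody A) acc := by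
  induction l generalizing acc with
  | nil => simp at hk
  | cons a t ih =>
    rcases List.mem_cons.mp hk with h | h
    · subst h
      exact le_trans (bbody_ge_contrib A acc k h0) (foldl_ge_acc A t _)
    · exact ih _ h (le_trans h0 (bbody_ge A acc a))

lemma foldl_le (A : List Int) (l : List Nat) (acc : Int) (M : Int)
    (hacc : acc ≤ M) (hc : ∀ k ∈ l, contrib A k ≤ M) :
    l.foldl (bbody A) acc ≤ M := by
  induction l generalizing acc with
  | nil => simpa
  | cons a t ih =>
    exact ih _ (bbody_le A acc a M hacc (hc a (by simp))) (fun k hk => hc k (by simp [hk]))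

-- characterization of loop 1
lemma loopJ_le (A : List Int) (j : Nat) : loopJ A j ≤ j := by
  induction j with
  | zero => simp [loopJ]
  | succ j ih => unfold loopJ; split_ifs <;> omega

lemma loopJ_maximal (A : List Int) (j : Nat) :
    ∀ k, loopJ A j < k → k ≤ j → A.getD 0 0 = A.getD k 0 := by
  induction j with
  | zero => intro k h1 h2; omega
  | succ j ih =>
    intro k h1 h2
    unfold loopJ at h1
    split_ifs at h1 with he
    · rcases Nat.lt_or_ge k (j + 1) with hlt | hge
      · exact ih k h1 (by omega)
      · have : k = j + 1 := by omega
        simpa [this] using he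
    · exact absurd h1 (by omega)

lemma loopJ_hits (A : List Int) (j : Nat) :
    loopJ A j = 0 ∨ A.getD 0 0 ≠ A.getD (loopJ A j) 0 := by
  induction j with
  | zero => simp [loopJ]
  | succ j ih =>
    unfold loopJ
    split_ifs with he
    · exact ih
    · exact Or.inr he

-- characterization of loop 2
lemma loopI_spec (A : List Int) (j i : Nat) (hij : i ≤ j) :
    i ≤ loopI A j i ∧ loopI A j i ≤ j ∧
    (loopI A j i = j ∨ A.getD (loopI A j i) 0 ≠ A.getD j 0) ∧
    (∀ k, i ≤ k → k < loopI A j i → A.getD k 0 = A.getD j 0) := by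
  generalize hn : j - i = n
  induction n generalizing i with
  | zero =>
    have : i = j := by omega
    subst this
    rw [loopI]
    simp
    intro k h1 h2
    omega
  | succ n ih =>
    rw [loopI]
    split_ifs with hc
    · obtain ⟨hle, hj, hhit, hall⟩ := ih (i + 1) (by omega) (by omega)
      refine ⟨by omega, hj, hhit, ?_⟩
      intro k h1 h2
      rcases Nat.lt_or_ge k (i + 1) with hlt | hge
      · have : k = i := by omega
        simpa [this] using hc.2
      · exact hall k hge h2
    · rw [not_and_or] at hc
      rcases hc with hc | hc
      · have : i = j := by omega
        refine ⟨le_refl _, by omega, Or.inl this, by omega⟩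
      · exact ⟨le_refl _, hij, Or.inr hc, by omega⟩

-- all-equal reformulation
lemma all_iff (A : List Int) :
    (A.all (fun x => x == A.getD 0 0) = true) ↔ ∀ k < A.length, A.getD k 0 = A.getD 0 0 := by
  rw [List.all_eq_true]
  constructor
  · intro h k hk
    have := h (A.getD k 0) (by rw [List.getD_eq_getElem _ _ hk]; exact List.getElem_mem hk)
    exact beq_iff_eq.mp this
  · intro h x hx
    obtain ⟨k, hk, hkx⟩ := List.mem_iff_getElem.mp hx
    have := h k hk
    rw [List.getD_eq_getElem _ _ hk] at this
    simpa [← hkx] using beq_iff_eq.mpr this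

-- ===== VERDICT (by name: the statement is the Claim_ definition above) =====
theorem solution_spec : Claim_equal_solution := by
  intro A _
  unfold Spec_solution
  rw [solution_alt_eq]
  unfold solution
  dsimp only
  set N := A.length with hN
  split_ifs with hall
  · -- all elements equal the first: every contribution is trivial, fold stays 0
    rw [all_iff] at hall
    have hzero : ∀ l : List Nat, (∀ k ∈ l, k < N) → l.foldl (bbody A) 0 = 0 := by
      intro l
      induction l with
      | nil => simp
      | cons a t ih =>
        intro hm
        have ha : a < N := hm a (by simp)
        have hb : bbody A 0 a = 0 := by
          unfold bbody
          have h1 : A.getD a 0 = A.getD 0 0 := hall a ha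
          have h2 : A.getD (N - 1) 0 = A.getD 0 0 := hall (N - 1) (by omega)
          simp only [← hN]
          simp only [h1, h2, ne_eq, not_true_eq_false, if_false]
        rw [List.foldl_cons, hb]
        exact ih (fun k hk => hm k (by simp [hk]))
    exact (hzero (List.range N) (fun k hk => List.mem_range.mp hk)).symm
  · -- some element differs from A[0]
    rw [all_iff] at hall
    simp only [not_forall, exists_prop] at hall
    obtain ⟨k0, hk0N, hk0⟩ := hall
    have hk0pos : 0 < k0 := by
      rcases Nat.eq_zero_or_pos k0 with h | h
      · simp [h] at hk0
      · exact h
    have hN2 : 2 ≤ N := by omega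
    set j1 := loopJ A (N - 1) with hj1
    set i2 := loopI A (N - 1) 0 with hi2
    have hj1le : j1 ≤ N - 1 := loopJ_le A (N - 1)
    -- j1 ≥ k0 and A[j1] ≠ A[0]
    have hj1ge : k0 ≤ j1 := by
      by_contra h
      exact hk0 ((loopJ_maximal A (N - 1) k0 (by omega) (by omega)).symm)
    have hj1ne : A.getD j1 0 ≠ A.getD 0 0 := by
      rcases loopJ_hits A (N - 1) with h | h
      · omega
      · exact fun he => h he.symm
    obtain ⟨_, hi2le, hi2hit, hi2all⟩ := loopI_spec A (N - 1) 0 (by omega)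
    -- some element differs from A[N-1], at index k1 < N-1
    have hex : ∃ k1 < N, A.getD k1 0 ≠ A.getD (N - 1) 0 := by
      by_contra h
      simp only [not_exists, not_and, not_not] at h
      have h0 := h 0 (by omega)
      have hk := h k0 hk0N
      exact hk0 (by rw [hk, ← h0])
    obtain ⟨k1, hk1N, hk1⟩ := hex
    have hk1lt : k1 < N - 1 := by
      rcases Nat.lt_or_ge k1 (N - 1) with h | h
      · exact h
      · have : k1 = N - 1 := by omega
        simp [this] at hk1
    have hi2lek1 : i2 ≤ k1 := by
      by_contra h
      exact hk1 (hi2all k1 (by omega) (by omega))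
    have hi2ne : A.getD i2 0 ≠ A.getD (N - 1) 0 := by
      rcases hi2hit with h | h
      · omega
      · exact h
    -- target value
    set M : Int := max ((j1 : Int) - 0) ((N : Int) - 1 - (i2 : Int)) with hM
    have hMnn : (0 : Int) ≤ M := le_max_of_le_left (by omega)
    refine le_antisymm ?_ ?_
    · -- M ≤ fold: via the contributions at j1 and i2
      rw [hM]
      have h1 : (j1 : Int) - 0 ≤ (List.range N).foldl (bbody A) 0 := by
        have := foldl_ge_contrib A (List.range N) 0 j1 (List.mem_range.mpr (by omega)) le_rfl
        unfold contrib at this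
        rw [if_pos hj1ne] at this
        simp [← hN] at this ⊢
        omega
      have h2 : (N : Int) - 1 - (i2 : Int) ≤ (List.range N).foldl (bbody A) 0 := by
        have := foldl_ge_contrib A (List.range N) 0 i2 (List.mem_range.mpr (by omega)) le_rfl
        unfold contrib at this
        rw [← hN, if_pos hi2ne] at this
        simp at this
        omega
      exact max_le h1 h2
    · -- fold ≤ M: every contribution is bounded by M
      apply foldl_le A _ _ _ hMnn
      intro k hk
      have hkN : k < N := List.mem_range.mp hk
      unfold contrib
      rw [← hN]
      have hu : (if A.getD k 0 ≠ A.getD 0 0 then (k : Int) else 0) ≤ M := by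
        split_ifs with h
        · have hkj1 : k ≤ j1 := by
            by_contra hlt
            exact h ((loopJ_maximal A (N - 1) k (by omega) (by omega)).symm)
          rw [hM]; simp only [le_max_iff]; omega
        · exact hMnn
      have hv : (if A.getD k 0 ≠ A.getD (N - 1) 0 then (N : Int) - 1 - (k : Int) else 0) ≤ M := by
        split_ifs with h
        · have hki2 : i2 ≤ k := by
            by_contra hlt
            exact h (hi2all k (by omega) (by omega))
          rw [hM]; simp only [le_max_iff]; omega
        · exact hMnn
      exact max_le hu hv
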